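-- pv_equiv track=rewrite | github.com/gafnaa/ctf-archives | _archives/tjctf/files/jwt-crack.py | solve_k_ord
-- ===== SOURCE A (Python) =====
-- def solve_k_ord(inp_ord, sig_val):
--     """
--     Solves for possible ord values of a key character.
--     'sig_val' is ord(sig_char) - 65.
--     Returns a list of possible integer values for ord(key_char).
--     """
--     solutions = []
--     for k in range(256):  # Test all possible byte values for the key character
--         try:
--             if pow(inp_ord, k, 26) == sig_val:
--                 solutions.append(k)
--         except ValueError:
--             # This can happen if inp_ord is 0 and k is 0, for example.
--             # In the context of this hash, ord(0) isn't used.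
--             pass
--     return solutions
-- ===== SOURCE B (Python) =====
-- def solve_k_ord(inp_ord, sig_val):
--     """
--     Solves for possible ord values of a key character.
--     Maintains cur = inp_ord**k % 26 incrementally (one multiply per step)
--     instead of a full modular exponentiation per candidate.
--     """
--     solutions = []
--     cur = 1  # pow(x, 0, 26) == 1 for every base, including 0 and negatives
--     for k in range(256):
--         if cur == sig_val:
--             solutions.append(k)
--         cur = (cur * inp_ord) % 26
--     return solutions
-- ===== Notes on version B (the rewrite author's own statement) =====
-- stated objective: faster
-- what changed: B maintains the running power inp_ord**k mod 26 with one modular multiply per iteration (invariant cur = inp_ord**k % 26, initialized to 1) instead of calling pow(inp_ord, k, 26) afresh each iteration, and drops the dead try/except.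
import Mathlib
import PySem

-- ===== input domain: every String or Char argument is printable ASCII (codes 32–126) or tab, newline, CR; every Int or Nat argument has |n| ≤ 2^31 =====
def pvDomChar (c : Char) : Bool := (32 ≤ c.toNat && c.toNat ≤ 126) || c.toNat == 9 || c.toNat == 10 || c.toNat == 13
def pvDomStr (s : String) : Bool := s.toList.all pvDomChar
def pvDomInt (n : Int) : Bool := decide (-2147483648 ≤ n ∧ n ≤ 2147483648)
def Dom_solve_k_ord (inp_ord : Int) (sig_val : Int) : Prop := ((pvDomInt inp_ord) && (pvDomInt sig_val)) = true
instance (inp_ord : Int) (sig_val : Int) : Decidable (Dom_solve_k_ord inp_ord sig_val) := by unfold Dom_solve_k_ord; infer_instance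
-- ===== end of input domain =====

-- B replaces per-candidate modular exponentiation by one running modular multiply per step (objective: faster, constant-factor).

-- ===== PORT A =====
-- The try/except ValueError in A is dead code: pow with a nonnegative exponent and
-- nonzero modulus never raises ValueError, so the port is the loop body alone.
def solve_k_ord (inp_ord : Int) (sig_val : Int) : List Int :=
  (PySem.List.pyRange 0 256 1).foldl
    (fun solutions k =>
      if PySem.Int.powMod inp_ord k.toNat 26 = sig_val then solutions ++ [k] else solutions)
    []

-- ===== PORT B =====
def solve_k_ord_altAux (inp_ord : Int) (sig_val : Int) (k : Nat) (cur : Int) (acc : List Int) : List Int :=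
  if k < 256 then
    solve_k_ord_altAux inp_ord sig_val (k + 1) (PySem.Int.mod (cur * inp_ord) 26)
      (if cur = sig_val then acc ++ [(k : Int)] else acc)
  else acc
termination_by 256 - k

def solve_k_ord_alt (inp_ord : Int) (sig_val : Int) : List Int :=
  solve_k_ord_altAux inp_ord sig_val 0 1 []

-- ===== PRECONDITION & SPEC =====
def Spec_solve_k_ord (inp_ord : Int) (sig_val : Int) (out : List Int) : Prop := out = solve_k_ord_alt inp_ord sig_val
instance (inp_ord : Int) (sig_val : Int) (out : List Int) : Decidable (Spec_solve_k_ord inp_ord sig_val out) := by unfold Spec_solve_k_ord; infer_instance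

-- ===== CLAIM (what is proved, stated in full; the proofs are below) =====
def Claim_equal_solve_k_ord : Prop := ∀ (inp_ord : Int) (sig_val : Int), Dom_solve_k_ord inp_ord sig_val → Spec_solve_k_ord inp_ord sig_val (solve_k_ord inp_ord sig_val)

-- ===== LEMMAS AND PROOFS =====

-- stepping the running value: ((x^n % 26) * x) % 26 = x^(n+1) % 26
lemma pv_mod_step (x : Int) (n : Nat) :
    PySem.Int.mod (PySem.Int.mod (x ^ n) 26 * x) 26 = PySem.Int.mod (x ^ (n + 1)) 26 := by
  rw [PySem.Int.mod_eq_emod_of_pos (by norm_num : (0:Int) < 26), PySem.Int.mod_eq_emod_of_pos (by norm_num : (0:Int) < 26),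
      PySem.Int.mod_eq_emod_of_pos (by norm_num : (0:Int) < 26), pow_succ, Int.mul_emod, Int.emod_emod_of_dvd _ dvd_rfl,
      ← Int.mul_emod]

-- cur = x^0 % 26 holds at start: 1 = 1 % 26
lemma pv_mod_init (x : Int) : PySem.Int.mod (x ^ 0) 26 = 1 := by
  rw [PySem.Int.mod_eq_emod_of_pos (by norm_num : (0:Int) < 26)]; norm_num

-- invariant: folding A's body over the remaining range equals B's loop carrying x^n % 26
lemma pv_loop_eq (inp_ord sig_val : Int) :
    ∀ (m n : Nat), n + m = 256 → ∀ acc : List Int,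
    (PySem.List.pyRange (n : Int) 256 1).foldl
      (fun solutions k =>
        if PySem.Int.powMod inp_ord k.toNat 26 = sig_val then solutions ++ [k] else solutions) acc
    = solve_k_ord_altAux inp_ord sig_val n (PySem.Int.mod (inp_ord ^ n) 26) acc := by
  intro m
  induction m with
  | zero =>
      intro n hn acc
      have h256 : n = 256 := by omega
      subst h256
      rw [PySem.List.pyRange_one_eq_nil (by norm_num)]
      rw [solve_k_ord_altAux]
      simp
  | succ m ih =>
      intro n hn acc
      have hlt : (n : Int) < 256 := by exact_mod_cast (by omega : n < 256)
      rw [PySem.List.pyRange_one_cons hlt]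
      rw [solve_k_ord_altAux]
      simp only [if_pos (show n < 256 by omega)]
      rw [List.foldl_cons]
      have hcast : ((n : Int) + 1) = ((n + 1 : Nat) : Int) := by push_cast; ring
      rw [hcast, ih (n + 1) (by omega)]
      rw [pv_mod_step]
      simp [PySem.Int.powMod]

-- ===== VERDICT (by name: the statement is the Claim_ definition above) =====
theorem solve_k_ord_spec : Claim_equal_solve_k_ord := by
  intro inp_ord sig_val _
  unfold Spec_solve_k_ord solve_k_ord solve_k_ord_alt
  have := pv_loop_eq inp_ord sig_val 256 0 rfl []
  simpa [pv_mod_init] using this
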